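-- pv_equiv track=rewrite | github.com/1nnokent/hahatone | algorithms.py | parse_students
-- ===== SOURCE A (Python) =====
-- def parse_students(st):
--     place_start = 1
--     parsed_st = []
--     leng = len(st)
--     i = 0
--     while i < leng:
--         place_finish = place_start
--         j = i + 1
--         while j < len(st) and st[j][4] == st[i][4]:
--             place_finish += 1
--             j += 1
--         for k in range(i, j):
--             if place_start == place_finish:
--                 parsed_st.append((str(place_start), st[k][0], st[k][1], st[k][2], st[k][4]))
--             else:
--                 parsed_st.append((str(place_start) + '-' + str(place_finish), st[k][0], st[k][1], st[k][2], st[k][4]))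
--         place_start = place_finish + 1
--         i = j
--     return parsed_st
-- ===== SOURCE B (Python) =====
-- def parse_students(st):
--     n = len(st)
--     start = [0] * n
--     for k in range(n):
--         start[k] = start[k - 1] if k > 0 and st[k][4] == st[k - 1][4] else k
--     finish = [0] * n
--     for k in range(n - 1, -1, -1):
--         finish[k] = finish[k + 1] if k < n - 1 and st[k][4] == st[k + 1][4] else k
--     out = []
--     for k in range(n):
--         s, f = start[k] + 1, finish[k] + 1
--         label = str(s) if s == f else '%d-%d' % (s, f)
--         out.append((label, st[k][0], st[k][1], st[k][2], st[k][4]))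
--     return out
-- ===== Notes on version B (the rewrite author's own statement) =====
-- stated objective: alternative
-- what changed: Instead of A's single run-by-run walk carrying a running place counter, B computes for every index its run-start in one left-to-right scan and its run-end in one right-to-left scan, then maps each element independently to its place-range label.
import Mathlib
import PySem

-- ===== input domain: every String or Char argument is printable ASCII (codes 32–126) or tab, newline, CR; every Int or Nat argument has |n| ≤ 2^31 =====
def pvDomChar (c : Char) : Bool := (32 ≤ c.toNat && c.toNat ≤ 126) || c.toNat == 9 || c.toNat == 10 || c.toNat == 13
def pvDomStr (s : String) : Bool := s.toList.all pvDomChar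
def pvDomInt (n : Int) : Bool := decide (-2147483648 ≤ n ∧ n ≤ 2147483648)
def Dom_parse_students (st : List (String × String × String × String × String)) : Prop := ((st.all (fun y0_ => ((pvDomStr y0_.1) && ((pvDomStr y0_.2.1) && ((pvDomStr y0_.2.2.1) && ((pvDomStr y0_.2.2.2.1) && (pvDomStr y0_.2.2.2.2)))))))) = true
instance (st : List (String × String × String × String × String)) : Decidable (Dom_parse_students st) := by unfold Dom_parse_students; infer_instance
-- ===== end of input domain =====

-- B replaces A's run-by-run walk (which carries a running place counter across groups)
-- by two independent scans computing each index's run-start and run-end, then a per-element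
-- map to its label (objective: alternative decomposition; same O(n) cost).

abbrev PvTup := String × String × String × String × String

-- ===== PORT A =====
-- inner 'while j < len(st) and st[j][4] == st[i][4]: place_finish += 1; j += 1'
def pvScanA (st : List PvTup) (iv : String) (pf : Int) (j : Nat) : Int × Nat :=
  if h : j < st.length then
    if (st.get ⟨j, h⟩).2.2.2.2 == iv then pvScanA st iv (pf + 1) (j + 1)
    else (pf, j)
  else (pf, j)
termination_by st.length - j

-- termination fact for the outer loop: the inner scan never moves j backwards
theorem pvScanA_ge (st : List PvTup) (iv : String) (pf : Int) (j : Nat) :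
    j ≤ (pvScanA st iv pf j).2 := by
  fun_induction pvScanA with
  | case1 => omega
  | case2 => simp
  | case3 => simp

-- the tuple appended by A's for-body (both branches of the if)
def pvEntry (ps pf : Int) (e : PvTup) : PvTup :=
  if ps == pf then (PySem.Int.toStr ps, e.1, e.2.1, e.2.2.1, e.2.2.2.2)
  else (PySem.Int.toStr ps ++ "-" ++ PySem.Int.toStr pf, e.1, e.2.1, e.2.2.1, e.2.2.2.2)

def pvLoopA (st : List PvTup) (i : Nat) (ps : Int) (acc : List PvTup) : List PvTup :=
  if h : i < st.length then
    let r := pvScanA st ((st.get ⟨i, h⟩).2.2.2.2) ps (i + 1)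
    let pf := r.1
    let j := r.2
    let acc' := acc ++ (List.range' i (j - i)).map (fun k => pvEntry ps pf (st.getD k ("", "", "", "", "")))
    pvLoopA st j (pf + 1) acc'
  else acc
termination_by st.length - i
decreasing_by
  have := pvScanA_ge st ((st.get ⟨i, h⟩).2.2.2.2) ps (i + 1)
  omega

def parse_students (st : List PvTup) : List PvTup := pvLoopA st 0 1 []

-- ===== PORT B =====
-- st[k][4] (k always in range in Source B's loops)
def pvKey (st : List PvTup) (k : Nat) : String := (st.getD k ("", "", "", "", "")).2.2.2.2

-- 'for k in range(n): start[k] = start[k-1] if k > 0 and st[k][4] == st[k-1][4] else k'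
def pvStartL (st : List PvTup) : List Nat :=
  (List.range st.length).foldl
    (fun acc k => acc ++ [if 0 < k ∧ pvKey st k = pvKey st (k - 1) then acc.getD (k - 1) 0 else k]) []

-- 'for k in range(n-1, -1, -1): finish[k] = finish[k+1] if k < n-1 and st[k][4] == st[k+1][4] else k'
-- (the list is built right-to-left by prepending, mirroring the backwards loop; acc = finish[k+1:])
def pvFinishL (st : List PvTup) : List Nat :=
  (List.range st.length).foldr
    (fun k acc => (if k < st.length - 1 ∧ pvKey st k = pvKey st (k + 1) then acc.getD 0 0 else k) :: acc) []

def parse_students_alt (st : List PvTup) : List PvTup :=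
  (List.range st.length).map (fun k =>
    let s : Int := ((pvStartL st).getD k 0 : Int) + 1
    let f : Int := ((pvFinishL st).getD k 0 : Int) + 1
    let label := if s == f then PySem.Int.toStr s else PySem.Int.toStr s ++ "-" ++ PySem.Int.toStr f
    let e := st.getD k ("", "", "", "", "")
    (label, e.1, e.2.1, e.2.2.1, e.2.2.2.2))

-- ===== PRECONDITION & SPEC =====
def Spec_parse_students (st : List (String × String × String × String × String)) (out : List (String × String × String × String × String)) : Prop := out = parse_students_alt st
instance (st : List (String × String × String × String × String)) (out : List (String × String × String × String × String)) : Decidable (Spec_parse_students st out) := by unfold Spec_parse_students; infer_instance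

-- ===== CLAIM (what is proved, stated in full; the proofs are below) =====
def Claim_equal_parse_students : Prop := ∀ (st : List (String × String × String × String × String)), Dom_parse_students st → Spec_parse_students st (parse_students st)

-- ===== LEMMAS AND PROOFS =====

-- recursive characterisations of the two scan arrays
def pvSFun (st : List PvTup) : Nat → Nat
  | 0 => 0
  | k + 1 => if pvKey st (k + 1) = pvKey st k then pvSFun st k else k + 1

def pvFFun (st : List PvTup) (k : Nat) : Nat :=
  if k < st.length - 1 ∧ pvKey st k = pvKey st (k + 1) then pvFFun st (k + 1) else k
termination_by st.length - k
decreasing_by omega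

theorem pvStartL_eq (st : List PvTup) :
    pvStartL st = (List.range st.length).map (pvSFun st) := by
  unfold pvStartL
  suffices H : ∀ m, (List.range m).foldl
      (fun acc k => acc ++ [if 0 < k ∧ pvKey st k = pvKey st (k - 1) then acc.getD (k - 1) 0 else k]) []
      = (List.range m).map (pvSFun st) from H st.length
  intro m
  induction m with
  | zero => simp
  | succ m ih =>
    rw [List.range_succ, List.foldl_append, ih, List.map_append]
    simp only [List.foldl_cons, List.foldl_nil, List.map_cons, List.map_nil]
    congr 1
    cases m with
    | zero => simp [pvSFun]
    | succ t =>
      have hget : ((List.range (t + 1)).map (pvSFun st)).getD (t + 1 - 1) 0 = pvSFun st t := by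
        rw [List.getD_eq_getElem _ _ (by simp)]
        simp
      rw [hget]
      show _ = [pvSFun st (t + 1)]
      rw [pvSFun]
      simp only [Nat.add_sub_cancel]
      split_ifs with h1 h2 h2
      · rfl
      · exact absurd h1.2 h2
      · exact absurd ⟨Nat.succ_pos _, h2⟩ h1
      · rfl

theorem pvFinishL_eq (st : List PvTup) :
    pvFinishL st = (List.range st.length).map (pvFFun st) := by
  unfold pvFinishL
  rw [List.range_eq_range']
  suffices H : ∀ d m, m + d = st.length → (List.range' m d).foldr
      (fun k acc => (if k < st.length - 1 ∧ pvKey st k = pvKey st (k + 1) then acc.getD 0 0 else k) :: acc) []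
      = (List.range' m d).map (pvFFun st) by
    exact H st.length 0 (by omega)
  intro d
  induction d with
  | zero => simp
  | succ d ih =>
    intro m hm
    rw [List.range'_succ, List.foldr_cons, ih (m + 1) (by omega), List.map_cons]
    congr 1
    rw [pvFFun]
    split_ifs with h
    · have hd : 1 ≤ d := by omega
      obtain ⟨d', rfl⟩ := Nat.exists_eq_add_of_le hd
      rw [Nat.add_comm 1 d', List.range'_succ, List.map_cons]
      simp
    · rfl

theorem pvScanA_eq (st : List PvTup) (iv : String) : ∀ (pf : Int) (j : Nat),
    pvScanA st iv pf j =
      (pf + (((st.drop j).takeWhile (fun y => y.2.2.2.2 == iv)).length : Int),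
       j + ((st.drop j).takeWhile (fun y => y.2.2.2.2 == iv)).length) := by
  intro pf j
  fun_induction pvScanA with
  | case1 pf j h heq ih =>
    rw [List.drop_eq_getElem_cons h]
    simp only [List.takeWhile_cons, List.get_eq_getElem] at *
    rw [heq, ih]
    simp only [if_true, List.length_cons]
    refine Prod.ext ?_ (by omega)
    push_cast; ring
  | case2 pf j h heq =>
    rw [List.drop_eq_getElem_cons h]
    simp only [List.takeWhile_cons, List.get_eq_getElem] at *
    simp [heq]
  | case3 pf j h =>
    rw [List.drop_eq_nil_of_le (by omega)]
    simp

-- elements inside a takeWhile prefix satisfy the predicate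
theorem pvTakeWhile_mem (p : PvTup → Bool) (d : PvTup) : ∀ (l : List PvTup) (t : Nat),
    t < (l.takeWhile p).length → p (l.getD t d) = true := by
  intro l
  induction l with
  | nil => simp
  | cons x xs ih =>
    intro t ht
    rw [List.takeWhile_cons] at ht
    by_cases hp : p x = true
    · simp only [hp, if_true, List.length_cons] at ht
      cases t with
      | zero => simp [hp]
      | succ t => rw [List.getD_cons_succ]; exact ih t (by omega)
    · simp [hp] at ht

-- the first element after a takeWhile prefix falsifies the predicate
theorem pvTakeWhile_stop (p : PvTup → Bool) (d : PvTup) : ∀ (l : List PvTup),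
    (l.takeWhile p).length < l.length → p (l.getD (l.takeWhile p).length d) = false := by
  intro l
  induction l with
  | nil => simp
  | cons x xs ih =>
    intro hlt
    rw [List.takeWhile_cons] at hlt ⊢
    by_cases hp : p x = true
    · simp only [hp, if_true, List.length_cons] at hlt ⊢
      rw [List.getD_cons_succ]
      exact ih (by omega)
    · simp only [Bool.not_eq_true] at hp
      simp [hp]

-- the element at pvOutAt position of B, expressed through pvSFun/pvFFun
def pvOutAt (st : List PvTup) (k : Nat) : PvTup :=
  let s : Int := (pvSFun st k : Int) + 1
  let f : Int := (pvFFun st k : Int) + 1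
  let label := if s == f then PySem.Int.toStr s else PySem.Int.toStr s ++ "-" ++ PySem.Int.toStr f
  let e := st.getD k ("", "", "", "", "")
  (label, e.1, e.2.1, e.2.2.1, e.2.2.2.2)

theorem pvAlt_eq (st : List PvTup) :
    parse_students_alt st = (List.range st.length).map (pvOutAt st) := by
  unfold parse_students_alt pvOutAt
  rw [pvStartL_eq, pvFinishL_eq]
  apply List.map_congr_left
  intro k hk
  rw [List.mem_range] at hk
  have hs : ((List.range st.length).map (pvSFun st)).getD k 0 = pvSFun st k := by
    rw [List.getD_eq_getElem _ _ (by simpa)]; simp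
  have hf : ((List.range st.length).map (pvFFun st)).getD k 0 = pvFFun st k := by
    rw [List.getD_eq_getElem _ _ (by simpa)]; simp
  rw [hs, hf]

-- the main run lemma: within a maximal run [i, i+m] all start/finish values are i / i+m
theorem pvRun_sFun (st : List PvTup)
    (i m : Nat) (hb : i = 0 ∨ st.length ≤ i ∨ pvKey st i ≠ pvKey st (i - 1))
    (hrun : ∀ t, 1 ≤ t → t ≤ m → pvKey st (i + t) = pvKey st i)
    (hi : i < st.length) :
    ∀ t, t ≤ m → pvSFun st (i + t) = i := by
  have hkey : ∀ t, t ≤ m → pvKey st (i + t) = pvKey st i := by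
    intro t ht
    cases t with
    | zero => rfl
    | succ u => exact hrun (u + 1) (by omega) ht
  intro t
  induction t with
  | zero =>
    intro _
    cases i with
    | zero => rfl
    | succ u =>
      rcases hb with h | h | h
      · exact absurd h (by omega)
      · omega
      · show pvSFun st (u + 1) = u + 1
        rw [pvSFun, if_neg (by simpa using h)]
  | succ t ih =>
    intro ht
    show pvSFun st (i + t + 1) = i
    have h1 : pvKey st (i + t + 1) = pvKey st (i + t) := by
      rw [show i + t + 1 = i + (t + 1) from rfl, hkey (t + 1) ht, hkey t (by omega)]
    rw [pvSFun, if_pos h1]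
    exact ih (by omega)

theorem pvRun_fFun (st : List PvTup)
    (i m : Nat)
    (hrun : ∀ t, 1 ≤ t → t ≤ m → pvKey st (i + t) = pvKey st i)
    (hstop : i + 1 + m < st.length → pvKey st (i + 1 + m) ≠ pvKey st i)
    (hm : i + 1 + m ≤ st.length) :
    ∀ t, t ≤ m → pvFFun st (i + t) = i + m := by
  have hkey : ∀ t, t ≤ m → pvKey st (i + t) = pvKey st i := by
    intro t ht
    cases t with
    | zero => rfl
    | succ u => exact hrun (u + 1) (by omega) ht
  have hend : pvFFun st (i + m) = i + m := by
    rw [pvFFun, if_neg]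
    rintro ⟨h1, h2⟩
    by_cases hn : i + 1 + m < st.length
    · refine hstop hn ?_
      rw [show i + 1 + m = i + m + 1 from by omega, ← h2, hkey m le_rfl]
    · omega
  suffices H : ∀ d t, t ≤ m → m - t ≤ d → pvFFun st (i + t) = i + m from
    fun t ht => H m t ht (by omega)
  intro d
  induction d with
  | zero =>
    intro t ht hd
    have htm : t = m := by omega
    rw [htm]; exact hend
  | succ d ih =>
    intro t ht hd
    by_cases htm : t = m
    · rw [htm]; exact hend
    · have htlt : t < m := by omega
      rw [pvFFun, if_pos]
      · rw [show i + t + 1 = i + (t + 1) from rfl]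
        exact ih (t + 1) (by omega) (by omega)
      · constructor
        · omega
        · rw [hkey t (by omega), show i + t + 1 = i + (t + 1) from rfl, hkey (t + 1) (by omega)]

theorem pvLoopA_eq (st : List PvTup) : ∀ (fuel i : Nat) (acc : List PvTup),
    st.length - i ≤ fuel →
    (i = 0 ∨ st.length ≤ i ∨ pvKey st i ≠ pvKey st (i - 1)) →
    pvLoopA st i ((i : Int) + 1) acc = acc ++ (List.range' i (st.length - i)).map (pvOutAt st) := by
  intro fuel
  induction fuel with
  | zero =>
    intro i acc hf hb
    rw [pvLoopA, dif_neg (by omega)]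
    simp [show st.length - i = 0 from by omega]
  | succ fuel ih =>
    intro i acc hf hb
    by_cases hi : i < st.length
    · rw [pvLoopA, dif_pos hi]
      simp only [List.get_eq_getElem, pvScanA_eq]
      set m : Nat := ((st.drop (i + 1)).takeWhile (fun y => y.2.2.2.2 == st[i].2.2.2.2)).length with hm
      have hmle : m ≤ st.length - (i + 1) := by
        have := (List.takeWhile_prefix (l := st.drop (i + 1))
          (fun y => y.2.2.2.2 == st[i].2.2.2.2)).length_le
        simp only [List.length_drop] at this
        omega
      have hkeyi : pvKey st i = st[i].2.2.2.2 := by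
        rw [pvKey, List.getD_eq_getElem _ _ hi]
      have hgetdrop : ∀ t, i + 1 + t < st.length →
          (st.drop (i + 1)).getD t ("", "", "", "", "") = st.getD (i + 1 + t) ("", "", "", "", "") := by
        intro t h
        rw [List.getD_eq_getElem _ _ (by simp; omega), List.getD_eq_getElem _ _ h,
          List.getElem_drop]
      have hrun : ∀ t, 1 ≤ t → t ≤ m → pvKey st (i + t) = pvKey st i := by
        intro t h1 h2
        have hP := pvTakeWhile_mem (fun y => y.2.2.2.2 == st[i].2.2.2.2) ("", "", "", "", "")
          (st.drop (i + 1)) (t - 1) (by omega)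
        rw [hgetdrop (t - 1) (by omega), show i + 1 + (t - 1) = i + t from by omega] at hP
        rw [hkeyi, pvKey]
        exact eq_of_beq hP
      have hstop : i + 1 + m < st.length → pvKey st (i + 1 + m) ≠ pvKey st i := by
        intro hlt
        have hP := pvTakeWhile_stop (fun y => y.2.2.2.2 == st[i].2.2.2.2) ("", "", "", "", "")
          (st.drop (i + 1)) (by simp; omega)
        rw [← hm, hgetdrop m hlt] at hP
        rw [hkeyi, pvKey]
        intro hEq
        simp only [] at hP
        rw [hEq] at hP
        simp at hP
      have hb' : i + 1 + m = 0 ∨ st.length ≤ i + 1 + m ∨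
          pvKey st (i + 1 + m) ≠ pvKey st (i + 1 + m - 1) := by
        by_cases hn : i + 1 + m < st.length
        · refine Or.inr (Or.inr ?_)
          have h2 : pvKey st (i + 1 + m - 1) = pvKey st i := by
            rw [show i + 1 + m - 1 = i + m from by omega]
            rcases Nat.eq_zero_or_pos m with h | h
            · simp [h]
            · exact hrun m h le_rfl
          rw [h2]
          exact hstop hn
        · exact Or.inr (Or.inl (by omega))
      have hrec := ih (i + 1 + m)
        (acc ++ (List.range' i (i + 1 + m - i)).map
          (fun k => pvEntry ((i : Int) + 1) ((i : Int) + 1 + (m : Int)) (st.getD k ("", "", "", "", ""))))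
        (by omega) hb'
      have hcast : (i : Int) + 1 + (m : Int) + 1 = ((i + 1 + m : Nat) : Int) + 1 := by
        push_cast; ring
      rw [hcast, hrec, List.append_assoc]
      congr 1
      have hsplit : List.range' i (st.length - i)
          = List.range' i (m + 1) ++ List.range' (i + 1 + m) (st.length - (i + 1 + m)) := by
        rw [show st.length - i = (m + 1) + (st.length - (i + 1 + m)) from by omega,
          ← List.range'_append, show i + 1 * (m + 1) = i + 1 + m from by omega]
      rw [hsplit, List.map_append, show i + 1 + m - i = m + 1 from by omega]
      congr 1
      apply List.map_congr_left
      intro k hk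
      rw [List.mem_range'_1] at hk
      obtain ⟨t, rfl⟩ : ∃ t, k = i + t := ⟨k - i, by omega⟩
      have ht : t ≤ m := by omega
      have hS := pvRun_sFun st i m hb hrun hi t ht
      have hF := pvRun_fFun st i m hrun hstop (by omega) t ht
      unfold pvEntry pvOutAt
      rw [hS, hF]
      by_cases h0 : m = 0
      · simp [h0]
      · have harg : (i : Int) + 1 + (m : Int) = (((i + m : Nat) : Int)) + 1 := by
          push_cast; ring
        simp only [harg]
        split_ifs <;> rfl
    · rw [pvLoopA, dif_neg hi]
      simp [show st.length - i = 0 from by omega]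

-- ===== VERDICT (by name: the statement is the Claim_ definition above) =====
theorem parse_students_spec : Claim_equal_parse_students := by
  intro st _
  unfold Spec_parse_students parse_students
  rw [pvAlt_eq]
  have h := pvLoopA_eq st st.length 0 [] (by omega) (Or.inl rfl)
  simpa [List.range_eq_range'] using h
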